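-- pv_equiv track=rewrite | github.com/mohenjo/codingdojang | CodingDojang/특이한계산기/main.py | _find_routes
-- ===== SOURCE A (Python) =====
-- def _progress(num: int):  # num에 대해 2배, 리버스 계산 튜플 반환
--     reversed_num = 1
--     if num >= 10:
--         strnum = str(num)
--         strnum = strnum[-1] + strnum[1:-1] + strnum[0]
--         reversed_num = int(strnum)
--     return num * 2, reversed_num
--
-- def _find_routes(target: int):
--     routes = {1: ""}
--     while target not in routes:  # 목표 정수가 routes에 없을 경우
--         tmpdic = {}
--         for k in routes:  # routes 내 키(정수)에 대해 2배, 리버스 수행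
--             dbl, swp = _progress(k)
--             if dbl not in routes and dbl not in tmpdic:
--                 tmpdic[dbl] = routes[k] + "D"
--             if swp not in routes and swp not in tmpdic:
--                 tmpdic[swp] = routes[k] + "R"
--         routes.update(tmpdic)  # 중복 키를 제외한 사전을 추가하여 routes 갱신
--     return routes[target]
-- ===== SOURCE B (Python) =====
-- def _find_routes(target: int):
--     routes = {1: ""}
--     frontier = [1]
--     while target not in routes:
--         new_keys = []
--         for k in frontier:
--             path = routes[k]
--             dbl = k * 2
--             if dbl not in routes:
--                 routes[dbl] = path + "D"
--                 new_keys.append(dbl)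
--             swp = 1
--             if k >= 10:
--                 s = str(k)
--                 swp = int(s[-1] + s[1:-1] + s[0])
--             if swp not in routes:
--                 routes[swp] = path + "R"
--                 new_keys.append(swp)
--         frontier = new_keys
--     return routes[target]
-- ===== Notes on version B (the rewrite author's own statement) =====
-- stated objective: alternative
-- what changed: B keeps a frontier queue of the keys added in the previous BFS level and scans only it, inserting new keys into routes immediately, instead of A's rescan of the entire routes dict (and a separate tmpdic merge) on every level.
import Mathlib
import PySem

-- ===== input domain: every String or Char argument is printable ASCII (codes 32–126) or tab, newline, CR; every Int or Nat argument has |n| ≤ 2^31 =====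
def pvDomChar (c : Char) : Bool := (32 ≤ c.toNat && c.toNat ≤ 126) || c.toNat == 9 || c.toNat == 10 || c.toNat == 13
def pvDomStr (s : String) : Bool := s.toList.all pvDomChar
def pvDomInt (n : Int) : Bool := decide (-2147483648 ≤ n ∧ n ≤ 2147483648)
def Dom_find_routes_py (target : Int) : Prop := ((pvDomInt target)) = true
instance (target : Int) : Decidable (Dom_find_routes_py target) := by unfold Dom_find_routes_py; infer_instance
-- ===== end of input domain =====

-- B replaces A's full rescan of the whole routes dict on every BFS level by a frontier-only scan
-- (a queue of the keys added in the previous level); same returned string.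
-- Port notes: both ports carry the same fuel counter (1000 loop iterations) only to make the
-- Python while-loop total; where the fuel runs out (Python's loop would still be running, e.g. a
-- target the BFS never reaches) both ports return the same "" and the equivalence is unconditional.
-- Each Python dict is ported as a Std.HashMap plus, where the Python iterates
-- over the dict, an explicit insertion-order key list (new keys are consed and the list reversed
-- where Python appends) — an exact representation of a Python dict's contents and key order.

-- ===== PORT A =====
-- digit-swap part of _progress (exact: for num ≥ 10, str(num) has ≥ 2 digit chars, so the
-- [-1]/[0] lookups cannot raise and int() of the digit string cannot fail; defaults unused)
def pvSwap (num : Int) : Int :=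
  if 10 ≤ num then
    let s := PySem.Int.toChars num
    ((PySem.Int.ofChars? ([PySem.List.pyGetD s (-1) '0'] ++ PySem.List.slice s (some 1) (some (-1)) ++ [PySem.List.pyGetD s 0 '0'])).getD 1)
  else 1

-- _progress
def pvProgress (num : Int) : Int × Int :=
  (num * 2, pvSwap num)

-- 'if key not in routes and key not in tmpdic: tmpdic[key] = s'  (tmpdic = map + reversed key order)
def pvInsA (m : Std.HashMap Int String) (tmp : Std.HashMap Int String × List Int) (key : Int) (s : String) :
    Std.HashMap Int String × List Int :=
  if !(m.contains key) && !(tmp.1.contains key) then (tmp.1.insert key s, key :: tmp.2) else tmp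

-- body of A's 'for k in routes' loop, acting on tmpdic
def pvStepA (m : Std.HashMap Int String) (tmp : Std.HashMap Int String × List Int) (k : Int) :
    Std.HashMap Int String × List Int :=
  pvInsA m (pvInsA m tmp (pvProgress k).1 (m.getD k "" ++ "D")) (pvProgress k).2 (m.getD k "" ++ "R")

-- one iteration of A's while loop: full scan of routes in key order, then routes.update(tmpdic)
def pvIterA (m : Std.HashMap Int String) (ks : List Int) : Std.HashMap Int String × List Int :=
  let tmp := ks.foldl (fun tmp k => pvStepA m tmp k) ((∅ : Std.HashMap Int String), ([] : List Int))
  (tmp.2.reverse.foldl (fun m' k => m'.insert k (tmp.1.getD k "")) m, ks ++ tmp.2.reverse)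

def pvLoopA : Nat → Int → Std.HashMap Int String → List Int → String
  | 0, _, _, _ => ""          -- fuel exhausted (Python's loop would still be running)
  | fuel+1, target, m, ks =>
    if m.contains target then m.getD target ""
    else
      let st := pvIterA m ks
      pvLoopA fuel target st.1 st.2

def find_routes_py (target : Int) : String :=
  pvLoopA 1000 target ((∅ : Std.HashMap Int String).insert 1 "") [1]

-- ===== PORT B =====
-- 'if key not in routes: routes[key] = s; new_keys.append(key)'
def pvPush (st : Std.HashMap Int String × List Int) (key : Int) (s : String) :
    Std.HashMap Int String × List Int :=
  if st.1.contains key then st else (st.1.insert key s, key :: st.2)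

-- body of B's 'for k in frontier' loop: immediate insertion into routes, new keys queued
def pvStepB (st : Std.HashMap Int String × List Int) (k : Int) :
    Std.HashMap Int String × List Int :=
  pvPush (pvPush st (k * 2) (st.1.getD k "" ++ "D")) (pvSwap k) (st.1.getD k "" ++ "R")

def pvLoopB : Nat → Int → Std.HashMap Int String → List Int → String
  | 0, _, _, _ => ""          -- fuel exhausted
  | fuel+1, target, m, frontier =>
    if m.contains target then m.getD target ""
    else
      let st := frontier.foldl pvStepB (m, ([] : List Int))
      pvLoopB fuel target st.1 st.2.reverse

def find_routes_py_alt (target : Int) : String :=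
  pvLoopB 1000 target ((∅ : Std.HashMap Int String).insert 1 "") [1]

-- ===== PRECONDITION & SPEC =====
def Spec_find_routes_py (target : Int) (out : String) : Prop := out = find_routes_py_alt target
instance (target : Int) (out : String) : Decidable (Spec_find_routes_py target out) := by unfold Spec_find_routes_py; infer_instance

-- ===== CLAIM (what is proved, stated in full; the proofs are below) =====
def Claim_equal_find_routes_py : Prop := ∀ (target : Int), Dom_find_routes_py target → Spec_find_routes_py target (find_routes_py target)

-- ===== LEMMAS AND PROOFS =====

-- relation between A's scan state (tmpdic map + reversed new-key list, routes m fixed)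
-- and B's scan state (routes-with-new-keys map + reversed new-key list)
def pvRel (m : Std.HashMap Int String) (A B : Std.HashMap Int String × List Int) : Prop :=
  (∀ j, B.1.contains j = (m.contains j || A.1.contains j)) ∧
  (∀ j, B.1.getD j "" = if A.1.contains j = true then A.1.getD j "" else m.getD j "") ∧
  B.2 = A.2 ∧
  (∀ j, A.1.contains j = true → m.contains j = false) ∧
  (∀ j, A.1.contains j = true ↔ j ∈ A.2) ∧
  A.2.Nodup

theorem pv_push_rel (m : Std.HashMap Int String) (A B : Std.HashMap Int String × List Int)
    (key : Int) (s : String) (h : pvRel m A B) :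
    pvRel m (pvInsA m A key s) (pvPush B key s) := by
  obtain ⟨h1, h2, h3, h4, h5, h6⟩ := h
  unfold pvInsA pvPush
  rw [h1 key]
  cases hm : m.contains key <;> cases ht : A.1.contains key
  · -- genuinely new key: both sides insert it and cons it
    simp only [Bool.or_self, Bool.not_false, Bool.and_self, if_true, Bool.false_eq_true, if_false]
    refine ⟨?_, ?_, ?_, ?_, ?_, ?_⟩
    · intro j
      rw [Std.HashMap.contains_insert, Std.HashMap.contains_insert, h1 j]
      cases hkj : (key == j) <;> simp
    · intro j
      rw [Std.HashMap.getD_insert, Std.HashMap.contains_insert, Std.HashMap.getD_insert]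
      cases hkj : (key == j)
      · simpa [hkj] using h2 j
      · simp
    · simpa using congrArg (key :: ·) h3
    · intro j hj
      rw [Std.HashMap.contains_insert] at hj
      rcases Bool.or_eq_true_iff.mp hj with hj | hj
      · have : key = j := by simpa using hj
        subst this; exact hm
      · exact h4 j hj
    · intro j
      rw [Std.HashMap.contains_insert]
      cases hkj : (key == j)
      · simp only [Bool.false_or]
        rw [h5 j]
        constructor
        · intro hh; exact List.mem_cons_of_mem _ hh
        · intro hh
          rcases List.mem_cons.mp hh with rfl | hh
          · simp at hkj
          · exact hh
      · have : key = j := by simpa using hkj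
        subst this
        simp [List.mem_cons]
    · refine List.Nodup.cons ?_ h6
      intro hmem
      have := (h5 key).mpr hmem
      rw [ht] at this; cases this
  · simp; exact ⟨h1, h2, h3, h4, h5, h6⟩
  · simp; exact ⟨h1, h2, h3, h4, h5, h6⟩
  · simp; exact ⟨h1, h2, h3, h4, h5, h6⟩

theorem pv_step_rel (m : Std.HashMap Int String) (A B : Std.HashMap Int String × List Int)
    (k : Int) (hk : m.contains k = true) (h : pvRel m A B) :
    pvRel m (pvStepA m A k) (pvStepB B k) := by
  have hpath : B.1.getD k "" = m.getD k "" := by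
    rw [h.2.1 k]
    cases hc : A.1.contains k
    · simp
    · rw [h.2.2.2.1 k hc] at hk; cases hk
  unfold pvStepB pvStepA
  rw [hpath]
  have h1 := pv_push_rel m A B (k * 2) (m.getD k "" ++ "D") h
  have hpath1 : (pvPush B (k * 2) (m.getD k "" ++ "D")).1.getD k "" = m.getD k "" := by
    rw [h1.2.1 k]
    cases hc : (pvInsA m A (k * 2) (m.getD k "" ++ "D")).1.contains k
    · simp
    · rw [h1.2.2.2.1 k hc] at hk; cases hk
  have h2 := pv_push_rel m _ _ (pvSwap k) (m.getD k "" ++ "R") h1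
  simpa [pvProgress, hpath1] using h2

theorem pv_scan_rel (m : Std.HashMap Int String) (fr : List Int) :
    ∀ A B : Std.HashMap Int String × List Int, pvRel m A B →
    (∀ k ∈ fr, m.contains k = true) →
    pvRel m (fr.foldl (fun tmp k => pvStepA m tmp k) A) (fr.foldl pvStepB B) := by
  induction fr with
  | nil => intro A B h _; exact h
  | cons a l ih =>
    intro A B h hfr
    simp only [List.foldl_cons]
    exact ih _ _ (pv_step_rel m A B a (hfr a (by simp)) h) (fun k hk => hfr k (by simp [hk]))

-- A-side monotonicity / coverage of the two conditional tmpdic inserts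
theorem pvInsA_mono (m : Std.HashMap Int String) (A : Std.HashMap Int String × List Int)
    (key j : Int) (s : String) (h : A.1.contains j = true) :
    (pvInsA m A key s).1.contains j = true := by
  unfold pvInsA; split
  · simp [Std.HashMap.contains_insert, h]
  · exact h

theorem pvInsA_covers (m : Std.HashMap Int String) (A : Std.HashMap Int String × List Int)
    (key : Int) (s : String) :
    m.contains key = true ∨ (pvInsA m A key s).1.contains key = true := by
  unfold pvInsA
  cases hm : m.contains key
  · cases ht : A.1.contains key
    · simp [ht, Std.HashMap.contains_insert]
    · simp [ht]
  · exact Or.inl rfl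

theorem pv_stepA_mono (m : Std.HashMap Int String) (A : Std.HashMap Int String × List Int)
    (k j : Int) (h : A.1.contains j = true) : (pvStepA m A k).1.contains j = true :=
  pvInsA_mono _ _ _ _ _ (pvInsA_mono _ _ _ _ _ h)

theorem pv_foldl_stepA_mono (m : Std.HashMap Int String) (l : List Int) :
    ∀ A : Std.HashMap Int String × List Int, ∀ j, A.1.contains j = true →
    ((l.foldl (fun tmp k => pvStepA m tmp k) A).1.contains j = true) := by
  induction l with
  | nil => intro A j h; exact h
  | cons a l ih => intro A j h; exact ih _ j (pv_stepA_mono m A a j h)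

theorem pv_stepA_children (m : Std.HashMap Int String) (A : Std.HashMap Int String × List Int) (k : Int) :
    (m.contains (k * 2) = true ∨ (pvStepA m A k).1.contains (k * 2) = true) ∧
    (m.contains (pvSwap k) = true ∨ (pvStepA m A k).1.contains (pvSwap k) = true) := by
  unfold pvStepA pvProgress
  constructor
  · rcases pvInsA_covers m A (k * 2) (m.getD k "" ++ "D") with h | h
    · exact Or.inl h
    · exact Or.inr (pvInsA_mono _ _ _ _ _ h)
  · exact pvInsA_covers m _ (pvSwap k) _

theorem pv_foldl_stepA_children (m : Std.HashMap Int String) (l : List Int) :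
    ∀ A : Std.HashMap Int String × List Int, ∀ k ∈ l,
      (m.contains (k * 2) = true ∨ ((l.foldl (fun tmp k => pvStepA m tmp k) A).1.contains (k * 2) = true)) ∧
      (m.contains (pvSwap k) = true ∨ ((l.foldl (fun tmp k => pvStepA m tmp k) A).1.contains (pvSwap k) = true)) := by
  induction l with
  | nil => intro A k hk; cases hk
  | cons a l ih =>
    intro A k hk
    rcases List.mem_cons.mp hk with rfl | hk
    · have h := pv_stepA_children m A k
      simp only [List.foldl_cons]
      constructor
      · rcases h.1 with h' | h'
        · exact Or.inl h'
        · exact Or.inr (pv_foldl_stepA_mono m l _ _ h')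
      · rcases h.2 with h' | h'
        · exact Or.inl h'
        · exact Or.inr (pv_foldl_stepA_mono m l _ _ h')
    · exact ih _ k hk

-- a key with both children already in routes contributes nothing to tmpdic
theorem pv_stepA_closed (m : Std.HashMap Int String) (A : Std.HashMap Int String × List Int) (k : Int)
    (h1 : m.contains (k * 2) = true) (h2 : m.contains (pvSwap k) = true) :
    pvStepA m A k = A := by
  simp [pvStepA, pvProgress, pvInsA, h1, h2]

theorem pv_foldl_stepA_closed (m : Std.HashMap Int String) (old : List Int) :
    ∀ A : Std.HashMap Int String × List Int,
    (∀ k ∈ old, m.contains (k * 2) = true ∧ m.contains (pvSwap k) = true) →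
    old.foldl (fun tmp k => pvStepA m tmp k) A = A := by
  induction old with
  | nil => intro A _; rfl
  | cons a l ih =>
    intro A h
    simp only [List.foldl_cons, pv_stepA_closed m A a (h a (by simp)).1 (h a (by simp)).2]
    exact ih A (fun k hk => h k (by simp [hk]))

-- the merge loop routes.update(tmpdic), extensionally
theorem pv_foldl_insert_contains (f : Int → String) (L : List Int) :
    ∀ (m : Std.HashMap Int String) (j : Int),
    ((L.foldl (fun m' k => m'.insert k (f k)) m).contains j) = true ↔ (m.contains j = true ∨ j ∈ L) := by
  induction L with
  | nil => intro m j; simp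
  | cons a l ih =>
    intro m j
    simp only [List.foldl_cons, ih, Std.HashMap.contains_insert, List.mem_cons,
      Bool.or_eq_true, beq_iff_eq]
    constructor
    · rintro ((rfl | h) | h)
      · exact Or.inr (Or.inl rfl)
      · exact Or.inl h
      · exact Or.inr (Or.inr h)
    · rintro (h | (rfl | h))
      · exact Or.inl (Or.inr h)
      · exact Or.inl (Or.inl rfl)
      · exact Or.inr h

theorem pv_foldl_insert_getD (f : Int → String) (L : List Int) :
    ∀ (m : Std.HashMap Int String) (j : Int),
    ((L.foldl (fun m' k => m'.insert k (f k)) m).getD j "") = if j ∈ L then f j else m.getD j "" := by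
  induction L with
  | nil => intro m j; simp
  | cons a l ih =>
    intro m j
    simp only [List.foldl_cons, ih, Std.HashMap.getD_insert, List.mem_cons, beq_iff_eq]
    by_cases hl : j ∈ l
    · simp [hl]
    · by_cases hja : j = a
      · subst hja; simp [hl]
      · have haj : ¬ a = j := fun h => hja h.symm
        simp [hl, hja, haj]

-- the main loop invariant: A's state is (m, ks = keys of m in insertion order),
-- B's state is (mB, frontier); mB agrees with m, frontier is the suffix of keys
-- added last level, every older key already has both children recorded
def pvInv (m : Std.HashMap Int String) (ks : List Int) (mB : Std.HashMap Int String) (frontier : List Int) : Prop :=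
  (∀ j, mB.contains j = m.contains j) ∧
  (∀ j, mB.getD j "" = m.getD j "") ∧
  (∀ j, m.contains j = true ↔ j ∈ ks) ∧
  ks.Nodup ∧
  ∃ old, ks = old ++ frontier ∧ ∀ k ∈ old, m.contains (k * 2) = true ∧ m.contains (pvSwap k) = true

theorem pv_main (fuel : Nat) (target : Int) :
    ∀ (m : Std.HashMap Int String) (ks : List Int) (mB : Std.HashMap Int String) (frontier : List Int),
    pvInv m ks mB frontier →
    pvLoopA fuel target m ks = pvLoopB fuel target mB frontier := by
  induction fuel with
  | zero => intro m ks mB frontier _; rfl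
  | succ f ih =>
    intro m ks mB frontier hinv
    obtain ⟨h1, h2, h3, hnd, old, hks, hclosed⟩ := hinv
    simp only [pvLoopA, pvLoopB, h1 target]
    cases ht : m.contains target
    · simp only [Bool.false_eq_true, if_false]
      -- A's full scan loses its closed prefix
      have hskip : ks.foldl (fun tmp k => pvStepA m tmp k) ((∅ : Std.HashMap Int String), ([] : List Int))
          = frontier.foldl (fun tmp k => pvStepA m tmp k) ((∅ : Std.HashMap Int String), ([] : List Int)) := by
        rw [hks, List.foldl_append, pv_foldl_stepA_closed m old _ hclosed]
      set T := frontier.foldl (fun tmp k => pvStepA m tmp k) ((∅ : Std.HashMap Int String), ([] : List Int)) with hT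
      -- B's frontier scan is related to A's tmpdic scan
      have hrel0 : pvRel m ((∅ : Std.HashMap Int String), ([] : List Int)) (mB, ([] : List Int)) := by
        refine ⟨?_, ?_, rfl, ?_, ?_, List.nodup_nil⟩
        · intro j; simp [h1 j]
        · intro j; simp [h2 j]
        · intro j hj; simp at hj
        · intro j; simp
      have hfr : ∀ k ∈ frontier, m.contains k = true := by
        intro k hk
        exact (h3 k).mpr (by rw [hks]; exact List.mem_append_right _ hk)
      have hrel := pv_scan_rel m frontier _ _ hrel0 hfr
      rw [← hT] at hrel
      obtain ⟨r1, r2, r3, r4, r5, r6⟩ := hrel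
      -- the two next-level states
      simp only [pvIterA, hskip]
      rw [r3]
      apply ih
      refine ⟨?_, ?_, ?_, ?_, ks, rfl, ?_⟩
      · intro j
        rw [r1 j, Bool.eq_iff_iff, Bool.or_eq_true, pv_foldl_insert_contains,
          List.mem_reverse, ← r5 j]
      · intro j
        rw [r2 j, pv_foldl_insert_getD]
        cases hc : T.1.contains j
        · have : ¬ j ∈ T.2.reverse := by
            rw [List.mem_reverse]
            intro hmem
            rw [(r5 j).mpr hmem] at hc; cases hc
          simp [this]
        · have : j ∈ T.2.reverse := List.mem_reverse.mpr ((r5 j).mp hc)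
          simp [this]
      · intro j
        rw [pv_foldl_insert_contains, List.mem_append, List.mem_reverse, ← r5 j, h3 j]
      · rw [List.nodup_append]
        refine ⟨hnd, List.nodup_reverse.mpr r6, ?_⟩
        intro j hj1 b hb heq
        subst heq
        rw [List.mem_reverse] at hb
        have hc := r4 j ((r5 j).mpr hb)
        rw [(h3 j).mpr hj1] at hc
        cases hc
      · -- every key of this level is closed in the merged map
        intro k hk
        have hlift : ∀ c : Int, (m.contains c = true ∨ T.1.contains c = true) →
            (T.2.reverse.foldl (fun m' k => m'.insert k (T.1.getD k "")) m).contains c = true := by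
          intro c hc
          rw [pv_foldl_insert_contains]
          rcases hc with hc | hc
          · exact Or.inl hc
          · exact Or.inr (List.mem_reverse.mpr ((r5 c).mp hc))
        rw [hks] at hk
        rcases List.mem_append.mp hk with hk | hk
        · exact ⟨hlift _ (Or.inl (hclosed k hk).1), hlift _ (Or.inl (hclosed k hk).2)⟩
        · have := pv_foldl_stepA_children m frontier ((∅ : Std.HashMap Int String), ([] : List Int)) k hk
          rw [← hT] at this
          exact ⟨hlift _ this.1, hlift _ this.2⟩
    · simp only [if_true, h2 target]

-- ===== VERDICT (by name: the statement is the Claim_ definition above) =====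
theorem find_routes_py_spec : Claim_equal_find_routes_py := by
  intro target _
  unfold Spec_find_routes_py find_routes_py find_routes_py_alt
  apply pv_main
  refine ⟨fun j => rfl, fun j => rfl, ?_, by simp, [], rfl, by simp⟩
  intro j
  simp [Std.HashMap.contains_insert]
  exact eq_comm
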